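-- pv_equiv track=rewrite | github.com/juanathanwickston/TCM | services/signal_service.py | compute_duplicate_map
-- ===== SOURCE A (Python) =====
-- from typing import Dict, List, Optional, Set
--
-- def compute_duplicate_map(containers: List[dict]) -> Dict[str, int]:
--     """
--     Build a map of display_name -> count of distinct relative_paths.
--     One-pass computation, no per-row queries.
--     """
--     name_paths: Dict[str, Set[str]] = {}
--     for c in containers:
--         name = (c.get('display_name') or '').lower().strip()
--         path = (c.get('relative_path') or '').lower().strip()
--         if name:
--             if name not in name_paths:
--                 name_paths[name] = set()
--             name_paths[name].add(path)
--
--     return {name: len(paths) for name, paths in name_paths.items()}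
-- ===== SOURCE B (Python) =====
-- def compute_duplicate_map(containers):
--     rows = [((c.get('display_name') or '').lower().strip(),
--              (c.get('relative_path') or '').lower().strip())
--             for c in containers]
--     # Sort the normalized pairs: equal pairs become adjacent, so every
--     # distinct (name, path) pair starts exactly one run.  Count run starts
--     # per non-empty name -- no sets, dedup falls out of the ordering.
--     counts = {}
--     prev = None
--     for pair in sorted(rows):
--         if pair != prev and pair[0]:
--             counts[pair[0]] = counts.get(pair[0], 0) + 1
--         prev = pair
--     # Emit the names in first-appearance order, as A's dict does.
--     result = {}
--     for name, _ in rows: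
--         if name and name not in result:
--             result[name] = counts[name]
--     return result
-- ===== Notes on version B (the rewrite author's own statement) =====
-- stated objective: alternative
-- what changed: A deduplicates with a dict of hashed per-name path sets and returns their len(); B sorts the normalized (name, path) pairs and counts run starts per name (sort-then-scan distinct counting), then emits the names in first-appearance order.
import Mathlib
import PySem

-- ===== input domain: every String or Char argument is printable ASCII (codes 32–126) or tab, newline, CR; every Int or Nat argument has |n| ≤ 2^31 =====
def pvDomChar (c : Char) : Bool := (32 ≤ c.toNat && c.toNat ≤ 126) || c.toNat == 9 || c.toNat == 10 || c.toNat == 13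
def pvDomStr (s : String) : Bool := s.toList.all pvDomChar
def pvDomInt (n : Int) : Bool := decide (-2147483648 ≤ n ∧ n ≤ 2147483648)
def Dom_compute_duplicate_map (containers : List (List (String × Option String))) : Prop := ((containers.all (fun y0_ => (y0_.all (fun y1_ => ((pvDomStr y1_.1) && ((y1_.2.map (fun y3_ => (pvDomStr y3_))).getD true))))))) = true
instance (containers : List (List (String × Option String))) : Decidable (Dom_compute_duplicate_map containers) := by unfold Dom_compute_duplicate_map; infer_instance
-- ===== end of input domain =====

-- B replaces A's hashed per-name path sets by sort-then-scan distinct counting: it sorts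
-- the normalized (name, path) pairs and counts run starts per name, then emits the names
-- in first-appearance order (objective: alternative algorithm, same result).

-- (c.get(k) or '').lower().strip()  — shared normalisation expression of both Pythons
def pvNorm (c : List (String × Option String)) (k : String) : String :=
  PySem.Str.strip (PySem.Str.lower ((((PySem.Dict.mk c).get? k).getD none).getD ""))

-- ===== PORT A =====
def compute_duplicate_map (containers : List (List (String × Option String))) : List (String × Int) :=
  let name_paths := containers.foldl (fun (d : PySem.Dict String (PySem.Set String)) c =>
    let name := pvNorm c "display_name"
    let path := pvNorm c "relative_path"
    if name ≠ "" then
      -- if name not in name_paths: name_paths[name] = set()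
      let d' := if d.contains name = false then d.insert name PySem.Set.empty else d
      -- name_paths[name].add(path)
      d'.modify name PySem.Set.empty (fun s => PySem.Set.add s path)
    else d) PySem.Dict.empty
  -- {name: len(paths) for name, paths in name_paths.items()}
  (name_paths.items.foldl (fun (out : PySem.Dict String Int) p =>
    out.insert p.1 (PySem.Set.len p.2)) PySem.Dict.empty).items

-- ===== PORT B =====
def compute_duplicate_map_alt (containers : List (List (String × Option String))) : List (String × Int) :=
  let rows := containers.map (fun c => (pvNorm c "display_name", pvNorm c "relative_path"))
  -- counts: run starts per non-empty name over sorted(rows); prev threads the previous pair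
  let st := (PySem.List.sorted2 rows Prod.fst Prod.snd).foldl
    (fun (st : PySem.Dict String Int × Option (String × String)) pair =>
      (if some pair ≠ st.2 ∧ pair.1 ≠ "" then st.1.insert pair.1 (st.1.getD pair.1 0 + 1)
       else st.1,
       some pair))
    (PySem.Dict.empty, none)
  let counts := st.1
  -- result: names in first-appearance order; counts[name] always has the key here, so getD is exact
  (rows.foldl (fun (result : PySem.Dict String Int) x =>
      if x.1 ≠ "" ∧ result.contains x.1 = false then result.insert x.1 (counts.getD x.1 0)
      else result)
    PySem.Dict.empty).items

-- ===== PRECONDITION & SPEC =====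
def Spec_compute_duplicate_map (containers : List (List (String × Option String))) (out : List (String × Int)) : Prop := out = compute_duplicate_map_alt containers
instance (containers : List (List (String × Option String))) (out : List (String × Int)) : Decidable (Spec_compute_duplicate_map containers out) := by unfold Spec_compute_duplicate_map; infer_instance

-- ===== CLAIM (what is proved, stated in full; the proofs are below) =====
def Claim_equal_compute_duplicate_map : Prop := ∀ (containers : List (List (String × Option String))), Dom_compute_duplicate_map containers → Spec_compute_duplicate_map containers (compute_duplicate_map containers)

-- ===== LEMMAS AND PROOFS =====

-- the normalised (name, path) pair of a container
def pvPair (c : List (String × Option String)) : String × String :=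
  (pvNorm c "display_name", pvNorm c "relative_path")

-- ---------- A-side closed form (dict of per-name sets) ----------

-- A's loop body on a pair with non-empty name
def pvStepA (d : PySem.Dict String (PySem.Set String)) (x : String × String) :
    PySem.Dict String (PySem.Set String) :=
  let d' := if d.contains x.1 = false then d.insert x.1 PySem.Set.empty else d
  d'.modify x.1 PySem.Set.empty (fun s => PySem.Set.add s x.2)

theorem pv_keys_stepA (d : PySem.Dict String (PySem.Set String)) (x : String × String) :
    (pvStepA d x).keys = PySem.Set.add d.keys x.1 := by
  unfold pvStepA
  by_cases h : d.contains x.1 = false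
  · rw [if_pos h, PySem.Dict.keys_modify,
        PySem.Dict.keys_insert_of_contains _ _ (by simp [PySem.Dict.contains_insert_self]),
        PySem.Dict.keys_insert_of_not_contains _ _ h,
        PySem.Set.add_of_not_mem (fun hm =>
          absurd ((PySem.Dict.contains_iff_mem_keys d x.1).mpr hm) (by simp [h]))]
  · have h' : d.contains x.1 = true := by revert h; cases d.contains x.1 <;> simp
    rw [if_neg h, PySem.Dict.keys_modify, PySem.Dict.keys_insert_of_contains _ _ h',
        PySem.Set.add_of_mem ((PySem.Dict.contains_iff_mem_keys d x.1).mp h')]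

theorem pv_getD_stepA (d : PySem.Dict String (PySem.Set String)) (x : String × String) (n : String) :
    (pvStepA d x).getD n PySem.Set.empty =
      if n = x.1 then PySem.Set.add (d.getD x.1 PySem.Set.empty) x.2
      else d.getD n PySem.Set.empty := by
  unfold pvStepA
  by_cases h : d.contains x.1 = false
  · rw [if_pos h, PySem.Dict.getD_modify]
    by_cases hn : n = x.1
    · rw [if_pos hn, if_pos hn, PySem.Dict.getD_insert,
          if_pos rfl, PySem.Dict.getD_of_not_contains d PySem.Set.empty h]
    · rw [if_neg hn, if_neg hn, PySem.Dict.getD_insert, if_neg hn]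
  · rw [if_neg h, PySem.Dict.getD_modify]

theorem pv_foldA_keys (M : List (String × String)) (d : PySem.Dict String (PySem.Set String)) :
    (M.foldl pvStepA d).keys = PySem.Set.update d.keys (M.map Prod.fst) := by
  induction M generalizing d with
  | nil => simp [PySem.Set.update_nil]
  | cons x M ih =>
    simp only [List.foldl_cons, List.map_cons, PySem.Set.update_cons, ih, pv_keys_stepA]

theorem pv_foldA_getD (M : List (String × String)) (d : PySem.Dict String (PySem.Set String))
    (n : String) :
    (M.foldl pvStepA d).getD n PySem.Set.empty =
      ((M.filter (fun x => x.1 == n)).map Prod.snd).foldl PySem.Set.add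
        (d.getD n PySem.Set.empty) := by
  induction M generalizing d with
  | nil => simp
  | cons x M ih =>
    simp only [List.foldl_cons, List.filter_cons, ih, pv_getD_stepA]
    by_cases hx : x.1 = n
    · simp [hx]
    · have hb : (x.1 == n) = false := by simp [hx]
      rw [if_neg (show ¬ n = x.1 from fun h => hx h.symm), hb]
      simp

-- set(xs).filter = set(xs.filter)
theorem pv_ofList_filter {α : Type} [BEq α] [LawfulBEq α] (l : List α) (p : α → Bool) :
    (PySem.Set.ofList l).filter p = PySem.Set.ofList (l.filter p) := by
  induction l using List.reverseRecOn with
  | nil => simp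
  | append_singleton l x ih =>
    rw [PySem.Set.ofList_append_singleton, PySem.Set.add_eq_ite, List.filter_append,
        List.filter_cons, List.filter_nil]
    by_cases hm : x ∈ PySem.Set.ofList l
    · rw [if_pos hm, ih]
      by_cases hp : p x
      · rw [if_pos hp, PySem.Set.ofList_append_singleton,
            PySem.Set.add_of_mem (by
              rw [PySem.Set.mem_ofList, List.mem_filter]
              exact ⟨(PySem.Set.mem_ofList l x).mp hm, hp⟩)]
      · simp [hp]
    · rw [if_neg hm, List.filter_append, ih, List.filter_cons, List.filter_nil]
      by_cases hp : p x
      · have hx' : x ∉ PySem.Set.ofList (l.filter p) := fun hxm =>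
          hm ((PySem.Set.mem_ofList l x).mpr (List.mem_of_mem_filter
            ((PySem.Set.mem_ofList (l.filter p) x).mp hxm)))
        rw [if_pos hp]
        rw [PySem.Set.ofList_append_singleton, PySem.Set.add_of_not_mem hx']
      · simp [hp]

-- set(map f xs) = map f (set(xs)) when f is injective on xs
theorem pv_ofList_map_inj {α β : Type} [BEq α] [LawfulBEq α] [BEq β] [LawfulBEq β]
    (l : List α) (f : α → β) (h : ∀ x ∈ l, ∀ y ∈ l, f x = f y → x = y) :
    PySem.Set.ofList (l.map f) = (PySem.Set.ofList l).map f := by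
  induction l using List.reverseRecOn with
  | nil => simp
  | append_singleton l x ih =>
    have h' : ∀ a ∈ l, ∀ b ∈ l, f a = f b → a = b := fun a ha b hb =>
      h a (List.mem_append_left _ ha) b (List.mem_append_left _ hb)
    rw [List.map_append, List.map_cons, List.map_nil, PySem.Set.ofList_append_singleton,
        PySem.Set.ofList_append_singleton, ih h', PySem.Set.add_eq_ite, PySem.Set.add_eq_ite]
    by_cases hm : x ∈ PySem.Set.ofList l
    · rw [if_pos (by
        rw [List.mem_map]
        exact ⟨x, hm, rfl⟩), if_pos hm]
    · rw [if_neg (by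
        rw [List.mem_map]
        rintro ⟨y, hy, hfy⟩
        have hyl : y ∈ l := (PySem.Set.mem_ofList l y).mp hy
        have := h y (List.mem_append_left _ hyl) x (by simp) hfy
        exact hm (this ▸ hy)), if_neg hm, List.map_append, List.map_cons, List.map_nil]

-- A's result in closed form
theorem pv_A_closed (containers : List (List (String × Option String))) :
    compute_duplicate_map containers =
      (PySem.Set.ofList (((containers.map pvPair).filter (fun x => decide (x.1 ≠ ""))).map Prod.fst)).map
        (fun k => (k, PySem.Set.len (PySem.Set.ofList
          ((((containers.map pvPair).filter (fun x => decide (x.1 ≠ ""))).filter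
            (fun x => x.1 == k)).map Prod.snd)))) := by
  have h1 : containers.foldl (fun (d : PySem.Dict String (PySem.Set String)) c =>
      let name := pvNorm c "display_name"
      let path := pvNorm c "relative_path"
      if name ≠ "" then
        let d' := if d.contains name = false then d.insert name PySem.Set.empty else d
        d'.modify name PySem.Set.empty (fun s => PySem.Set.add s path)
      else d) PySem.Dict.empty =
      ((containers.map pvPair).filter (fun x => decide (x.1 ≠ ""))).foldl pvStepA
        PySem.Dict.empty := by
    rw [List.foldl_filter, List.foldl_map]
    simp only [decide_eq_true_eq]
    rfl
  set M := (containers.map pvPair).filter (fun x => decide (x.1 ≠ "")) with hM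
  unfold compute_duplicate_map
  rw [h1]
  set G := M.foldl pvStepA PySem.Dict.empty with hG
  have hkeys : G.keys = PySem.Set.ofList (M.map Prod.fst) := by
    rw [hG, pv_foldA_keys, PySem.Dict.keys_empty, PySem.Set.update_nil_left]
  have hnodup : G.keys.Nodup := by rw [hkeys]; exact PySem.Set.nodup_ofList _
  have hfstnodup : (G.items.map Prod.fst).Nodup := hnodup
  rw [PySem.Dict.items_foldl_insert_fresh G.items Prod.fst (fun p => PySem.Set.len p.2)
      PySem.Dict.empty (fun a _ => PySem.Dict.contains_empty a.1) hfstnodup]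
  have hempty : (PySem.Dict.empty : PySem.Dict String Int).items = [] := rfl
  rw [hempty, List.nil_append, PySem.Dict.items_eq_map_keys G hnodup PySem.Set.empty,
      List.map_map, hkeys]
  apply List.map_congr_left
  intro k _
  simp only [Function.comp]
  congr 1
  rw [hG, pv_foldA_getD, PySem.Dict.getD_empty,
      show (PySem.Set.empty : PySem.Set String) = [] from rfl, ← PySem.Set.ofList_eq_foldl]

-- ---------- B-side: the sorted list is lexicographically ordered ----------

-- Python's '<=' on (str, str) tuples (lexicographic)
def pvLexLe (a b : String × String) : Prop := a.1 < b.1 ∨ (a.1 = b.1 ∧ a.2 ≤ b.2)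

-- the comparison sorted2 rows Prod.fst Prod.snd sorts by
def pvBefore (a b : String × String) : Bool :=
  decide (a.1 < b.1) || (!decide (b.1 < a.1) && decide (a.2 < b.2))

theorem pv_before_false (a b : String × String) (h : pvBefore a b = false) : pvLexLe b a := by
  unfold pvBefore at h
  unfold pvLexLe
  rcases Bool.or_eq_false_iff.mp h with ⟨h1, h2⟩
  rcases Bool.and_eq_false_iff.mp h2 with h3 | h4
  · exact Or.inl (by simpa using h3)
  · have hab : ¬ a.1 < b.1 := by simpa using h1
    have hsnd : ¬ a.2 < b.2 := by simpa using h4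
    rcases lt_trichotomy a.1 b.1 with h | h | h
    · exact absurd h hab
    · exact Or.inr ⟨h.symm, le_of_not_gt hsnd⟩
    · exact Or.inl h

theorem pv_before_true (a b : String × String) (h : pvBefore a b = true) : pvLexLe a b := by
  unfold pvBefore at h
  unfold pvLexLe
  rcases Bool.or_eq_true_iff.mp h with h1 | h2
  · exact Or.inl (by simpa using h1)
  · rcases Bool.and_eq_true_iff.mp h2 with ⟨h3, h4⟩
    have hba : ¬ b.1 < a.1 := by simpa using h3
    rcases lt_trichotomy a.1 b.1 with h | h | h
    · exact Or.inl h
    · exact Or.inr ⟨h, le_of_lt (by simpa using h4)⟩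
    · exact absurd h hba

theorem pvLexLe_trans {a b c : String × String} (h1 : pvLexLe a b) (h2 : pvLexLe b c) :
    pvLexLe a c := by
  unfold pvLexLe at *
  rcases h1 with h1 | ⟨h1, h1'⟩ <;> rcases h2 with h2 | ⟨h2, h2'⟩
  · exact Or.inl (lt_trans h1 h2)
  · exact Or.inl (h2 ▸ h1)
  · exact Or.inl (h1 ▸ h2)
  · exact Or.inr ⟨h1.trans h2, le_trans h1' h2'⟩

theorem pvLexLe_antisymm {a b : String × String} (h1 : pvLexLe a b) (h2 : pvLexLe b a) :
    a = b := by
  unfold pvLexLe at *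
  rcases h1 with h1 | ⟨h1, h1'⟩ <;> rcases h2 with h2 | ⟨h2, h2'⟩
  · exact absurd h2 (lt_asymm h1)
  · exact absurd h1 (h2 ▸ lt_irrefl _)
  · exact absurd h2 (h1 ▸ lt_irrefl _)
  · exact Prod.ext h1 (le_antisymm h1' h2')

theorem pv_insertBy_pairwise (x : String × String) (ys : List (String × String))
    (h : ys.Pairwise pvLexLe) :
    (PySem.List.insertBy pvBefore x ys).Pairwise pvLexLe := by
  induction ys with
  | nil => simp [PySem.List.insertBy]
  | cons y ys ih =>
    rw [List.pairwise_cons] at h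
    show (if pvBefore x y = true then x :: y :: ys else
      y :: PySem.List.insertBy pvBefore x ys).Pairwise pvLexLe
    by_cases hb : pvBefore x y = true
    · rw [if_pos hb]
      have hxy : pvLexLe x y := pv_before_true _ _ hb
      refine List.pairwise_cons.mpr ⟨?_, List.pairwise_cons.mpr h⟩
      intro z hz
      rcases List.mem_cons.mp hz with rfl | hz
      · exact hxy
      · exact pvLexLe_trans hxy (h.1 z hz)
    · rw [if_neg hb]
      have hyx : pvLexLe y x := pv_before_false _ _ (by revert hb; cases pvBefore x y <;> simp)
      refine List.pairwise_cons.mpr ⟨?_, ih h.2⟩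
      intro z hz
      rcases (PySem.List.mem_insertBy _ _ _ _).mp hz with rfl | hz
      · exact hyx
      · exact h.1 z hz

theorem pv_sorted2_pairwise (xs : List (String × String)) :
    (PySem.List.sorted2 xs Prod.fst Prod.snd).Pairwise pvLexLe := by
  have hgen : ∀ (l acc : List (String × String)), acc.Pairwise pvLexLe →
      (l.foldl (fun acc x => PySem.List.insertBy pvBefore x acc) acc).Pairwise pvLexLe := by
    intro l
    induction l with
    | nil => intro acc h; simpa using h
    | cons x l ih =>
      intro acc h
      exact ih _ (pv_insertBy_pairwise x acc h)
  exact hgen xs [] (List.Pairwise.nil)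

-- ---------- B-side: the run-counting pass ----------

-- the counting loop body: (counts, prev) updated by one sorted pair
def pvStepC (st : PySem.Dict String Int × Option (String × String)) (pair : String × String) :
    PySem.Dict String Int × Option (String × String) :=
  (if some pair ≠ st.2 ∧ pair.1 ≠ "" then st.1.insert pair.1 (st.1.getD pair.1 0 + 1)
   else st.1,
   some pair)

-- run starts of s relative to prev, restricted to name k
def pvRuns : List (String × String) → Option (String × String) → String → Int
  | [], _, _ => 0
  | x :: t, prev, k =>
      (if (some x ≠ prev ∧ x.1 ≠ "") ∧ x.1 = k then 1 else 0) + pvRuns t (some x) k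

theorem pv_foldC (s : List (String × String)) (d : PySem.Dict String Int)
    (prev : Option (String × String)) (k : String) :
    ((s.foldl pvStepC (d, prev)).1).getD k 0 = d.getD k 0 + pvRuns s prev k := by
  induction s generalizing d prev with
  | nil => simp [pvRuns]
  | cons x t ih =>
    rw [List.foldl_cons]
    have hstep : pvStepC (d, prev) x =
        (if some x ≠ prev ∧ x.1 ≠ "" then d.insert x.1 (d.getD x.1 0 + 1) else d, some x) := rfl
    rw [hstep]
    simp only [pvRuns]
    by_cases hc : some x ≠ prev ∧ x.1 ≠ ""
    · rw [if_pos hc, ih]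
      by_cases hk : x.1 = k
      · rw [if_pos ⟨hc, hk⟩, PySem.Dict.getD_insert, if_pos hk.symm, hk]
        ring
      · rw [if_neg (fun h => hk h.2), PySem.Dict.getD_insert,
            if_neg (fun h => hk h.symm)]
        ring
    · rw [if_neg hc, ih, if_neg (fun h => hc h.1)]
      ring

theorem pv_runs_sorted (s : List (String × String)) (prev : Option (String × String))
    (k : String) (hs : s.Pairwise pvLexLe)
    (hprev : ∀ p, prev = some p → ∀ y ∈ s, pvLexLe p y) :
    pvRuns s prev k =
      ((PySem.Set.ofList (s.filter
        (fun x => decide ((some x ≠ prev ∧ x.1 ≠ "") ∧ x.1 = k)))).length : Int) := by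
  induction s generalizing prev with
  | nil => simp [pvRuns]
  | cons x t ih =>
    rw [List.pairwise_cons] at hs
    simp only [pvRuns]
    rw [List.filter_cons]
    by_cases hxprev : some x = prev
    · -- x equals prev: not a run start, and the tail's prev is the same pair
      subst hxprev
      have hne : ¬ ((some x ≠ some x ∧ x.1 ≠ "") ∧ x.1 = k) := fun h => h.1.1 rfl
      rw [if_neg hne, if_neg (by simpa using hne)]
      rw [ih (some x) hs.2 (fun p hp y hy => by
        cases Option.some.inj hp
        exact hs.1 y hy)]
      ring
    · -- x differs from prev; every y in t also differs from prev (prev < x ≤ y)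
      have hty : ∀ y ∈ t, some y ≠ prev := by
        intro y hy hcon
        rcases prev with _ | p
        · exact Option.some_ne_none y hcon
        · have hpx : pvLexLe p x := hprev p rfl x (List.mem_cons_self)
          have hpy : p = y := Option.some.inj hcon.symm
          have hxy : pvLexLe x y := hs.1 y hy
          have : x = p := pvLexLe_antisymm (hpy ▸ hxy) hpx
          exact hxprev (by rw [this])
      have hfilt : t.filter (fun y => decide ((some y ≠ prev ∧ y.1 ≠ "") ∧ y.1 = k)) =
          t.filter (fun y => decide (y.1 ≠ "" ∧ y.1 = k)) := by
        apply List.filter_congr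
        intro y hy
        simp only [decide_eq_decide]
        exact ⟨fun h => ⟨h.1.2, h.2⟩, fun h => ⟨⟨hty y hy, h.1⟩, h.2⟩⟩
      have ihx := ih (some x) hs.2 (fun p hp y hy => by
        cases Option.some.inj hp
        exact hs.1 y hy)
      have hfilt2 : t.filter (fun y => decide ((some y ≠ some x ∧ y.1 ≠ "") ∧ y.1 = k)) =
          (t.filter (fun y => decide (y.1 ≠ "" ∧ y.1 = k))).filter
            (fun y => !(y == x)) := by
        rw [List.filter_filter]
        apply List.filter_congr
        intro y hy
        by_cases hyx : y = x <;> simp [hyx]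
      by_cases hck : (x.1 ≠ "" ∧ x.1 = k)
      · have hcx : ((some x ≠ prev ∧ x.1 ≠ "") ∧ x.1 = k) := ⟨⟨hxprev, hck.1⟩, hck.2⟩
        rw [if_pos hcx, if_pos (by simpa using hcx), ihx, hfilt2,
            PySem.Set.ofList_cons]
        rw [hfilt, List.length_cons]
        have hdis : (PySem.Set.ofList (t.filter fun y => decide (y.1 ≠ "" ∧ y.1 = k))).discard x =
            PySem.Set.ofList ((t.filter fun y => decide (y.1 ≠ "" ∧ y.1 = k)).filter
              (fun y => !(y == x))) := by
          show (PySem.Set.ofList _).filter _ = _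
          exact pv_ofList_filter _ _
        rw [hdis]
        push_cast
        ring
      · have hcx : ¬ ((some x ≠ prev ∧ x.1 ≠ "") ∧ x.1 = k) := fun h => hck ⟨h.1.2, h.2⟩
        rw [if_neg hcx, if_neg (by simpa using hcx), ihx, hfilt2, hfilt]
        have hsame : (t.filter fun y => decide (y.1 ≠ "" ∧ y.1 = k)).filter
            (fun y => !(y == x)) = t.filter (fun y => decide (y.1 ≠ "" ∧ y.1 = k)) := by
          apply List.filter_eq_self.mpr
          intro y hy
          have hyx : ¬ y = x := by
            intro hcon
            exact hck (by simpa [hcon] using (List.of_mem_filter hy))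
          simp [hyx]
        rw [hsame]
        ring

-- |set(l)| is invariant under permutation of l
theorem pv_length_ofList_perm {α : Type} [BEq α] [LawfulBEq α] [DecidableEq α]
    {l l' : List α} (h : l.Perm l') :
    (PySem.Set.ofList l).length = (PySem.Set.ofList l').length := by
  have hfin : ∀ (m : List α), (PySem.Set.ofList m).length = m.toFinset.card := by
    intro m
    rw [← List.toFinset_card_of_nodup (PySem.Set.nodup_ofList m)]
    congr 1
    apply Finset.ext
    intro a
    simp [List.mem_toFinset, PySem.Set.mem_ofList]
  rw [hfin, hfin, List.toFinset_eq_of_perm l l' h]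

-- ---------- B-side: the first-appearance-order output pass ----------

-- the output loop body, with the finished counts dict fixed
def pvStepB (counts : PySem.Dict String Int) (d : PySem.Dict String Int) (x : String × String) :
    PySem.Dict String Int :=
  if x.1 ≠ "" ∧ d.contains x.1 = false then d.insert x.1 (counts.getD x.1 0) else d

theorem pv_keys_stepB (counts d : PySem.Dict String Int) (x : String × String) :
    (pvStepB counts d x).keys = if x.1 ≠ "" then PySem.Set.add d.keys x.1 else d.keys := by
  unfold pvStepB
  by_cases h1 : x.1 ≠ ""
  · rw [if_pos h1]
    by_cases h2 : d.contains x.1 = false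
    · rw [if_pos ⟨h1, h2⟩, PySem.Dict.keys_insert_of_not_contains _ _ h2,
          PySem.Set.add_of_not_mem (fun hm =>
            absurd ((PySem.Dict.contains_iff_mem_keys d x.1).mpr hm) (by simp [h2]))]
    · have h2' : d.contains x.1 = true := by revert h2; cases d.contains x.1 <;> simp
      rw [if_neg (fun h => absurd h.2 h2),
          PySem.Set.add_of_mem ((PySem.Dict.contains_iff_mem_keys d x.1).mp h2')]
  · rw [if_neg (fun h => h1 h.1), if_neg h1]

theorem pv_foldB_keys (counts : PySem.Dict String Int) (rows : List (String × String))
    (d : PySem.Dict String Int) :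
    (rows.foldl (pvStepB counts) d).keys =
      PySem.Set.update d.keys ((rows.filter (fun x => decide (x.1 ≠ ""))).map Prod.fst) := by
  induction rows generalizing d with
  | nil => simp [PySem.Set.update_nil]
  | cons x rows ih =>
    rw [List.foldl_cons, List.filter_cons, ih, pv_keys_stepB]
    by_cases h : x.1 ≠ ""
    · rw [if_pos h, if_pos (by simpa using h), List.map_cons, PySem.Set.update_cons]
    · rw [if_neg h, if_neg (by simpa using h)]

theorem pv_foldB_getD (counts : PySem.Dict String Int) (rows : List (String × String))
    (d : PySem.Dict String Int) (k : String) :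
    (rows.foldl (pvStepB counts) d).getD k 0 =
      if d.contains k = true then d.getD k 0
      else if k ∈ (rows.filter (fun x => decide (x.1 ≠ ""))).map Prod.fst then counts.getD k 0
      else 0 := by
  induction rows generalizing d with
  | nil =>
    rw [List.foldl_nil]
    by_cases h : d.contains k = true
    · rw [if_pos h]
    · rw [if_neg h]
      simp only [List.filter_nil, List.map_nil, List.not_mem_nil, if_false]
      exact PySem.Dict.getD_of_not_contains d 0 (by revert h; cases d.contains k <;> simp)
  | cons x rows ih =>
    rw [List.foldl_cons, List.filter_cons]
    by_cases h1 : x.1 ≠ ""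
    · rw [if_pos (show (decide (x.1 ≠ "") = true) from by simpa using h1), List.map_cons]
      by_cases h2 : d.contains x.1 = false
      · have hstep : pvStepB counts d x = d.insert x.1 (counts.getD x.1 0) := by
          unfold pvStepB; rw [if_pos ⟨h1, h2⟩]
        rw [hstep, ih]
        by_cases hk : k = x.1
        · subst hk
          rw [if_pos (by simp [PySem.Dict.contains_insert_self]),
              PySem.Dict.getD_insert, if_pos rfl, if_neg (by simp [h2]),
              if_pos (List.mem_cons_self)]
        · rw [PySem.Dict.contains_insert, PySem.Dict.getD_insert, if_neg hk]
          have hbeq : (k == x.1) = false := by simp [hk]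
          rw [hbeq, Bool.false_or]
          by_cases h3 : d.contains k = true
          · rw [if_pos h3, if_pos h3]
          · rw [if_neg h3, if_neg h3]
            simp only [List.mem_cons]
            by_cases h4 : k ∈ (rows.filter (fun x => decide (x.1 ≠ ""))).map Prod.fst
            · rw [if_pos h4, if_pos (Or.inr h4)]
            · rw [if_neg h4, if_neg (fun h => h.elim hk h4)]
      · have hstep : pvStepB counts d x = d := by
          unfold pvStepB; rw [if_neg (fun h => absurd h.2 h2)]
        rw [hstep, ih]
        by_cases h3 : d.contains k = true
        · rw [if_pos h3, if_pos h3]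
        · rw [if_neg h3, if_neg h3]
          have hk : ¬ k = x.1 := fun hcon =>
            h3 (by rw [hcon]; revert h2; cases d.contains x.1 <;> simp)
          simp only [List.mem_cons]
          by_cases h4 : k ∈ (rows.filter (fun x => decide (x.1 ≠ ""))).map Prod.fst
          · rw [if_pos h4, if_pos (Or.inr h4)]
          · rw [if_neg h4, if_neg (fun h => h.elim hk h4)]
    · have hstep : pvStepB counts d x = d := by
        unfold pvStepB; rw [if_neg (fun h => h1 h.1)]
      rw [if_neg (show ¬ (decide (x.1 ≠ "") = true) from by simpa using h1), hstep, ih]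

-- B's result in closed form: first-appearance names, each paired with its counts entry
theorem pv_B_closed (containers : List (List (String × Option String))) :
    compute_duplicate_map_alt containers =
      (PySem.Set.ofList (((containers.map pvPair).filter (fun x => decide (x.1 ≠ ""))).map Prod.fst)).map
        (fun k => (k,
          (((PySem.List.sorted2 (containers.map pvPair) Prod.fst Prod.snd).foldl pvStepC
            (PySem.Dict.empty, none)).1).getD k 0)) := by
  have hsh : compute_duplicate_map_alt containers =
      ((containers.map pvPair).foldl
        (pvStepB (((PySem.List.sorted2 (containers.map pvPair) Prod.fst Prod.snd).foldl pvStepC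
          (PySem.Dict.empty, none)).1))
        PySem.Dict.empty).items := rfl
  rw [hsh]
  set rows := containers.map pvPair with hrowsdef
  set C := ((PySem.List.sorted2 rows Prod.fst Prod.snd).foldl pvStepC
    (PySem.Dict.empty, none)).1 with hC
  set G := rows.foldl (pvStepB C) PySem.Dict.empty with hG
  have hkeys : G.keys =
      PySem.Set.ofList ((rows.filter (fun x => decide (x.1 ≠ ""))).map Prod.fst) := by
    rw [hG, pv_foldB_keys, PySem.Dict.keys_empty, PySem.Set.update_nil_left]
  have hnodup : G.keys.Nodup := by rw [hkeys]; exact PySem.Set.nodup_ofList _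
  rw [PySem.Dict.items_eq_map_keys G hnodup 0, hkeys]
  apply List.map_congr_left
  intro k hk
  have hmem : k ∈ (rows.filter (fun x => decide (x.1 ≠ ""))).map Prod.fst :=
    (PySem.Set.mem_ofList _ _).mp hk
  rw [hG, pv_foldB_getD, if_neg (by simp [PySem.Dict.contains_empty]), if_pos hmem]

-- ===== VERDICT (by name: the statement is the Claim_ definition above) =====
theorem compute_duplicate_map_spec : Claim_equal_compute_duplicate_map := by
  intro containers _
  unfold Spec_compute_duplicate_map
  rw [pv_A_closed, pv_B_closed]
  apply List.map_congr_left
  intro k hk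
  set rows := containers.map pvPair with hrows
  set M := rows.filter (fun x => decide (x.1 ≠ "")) with hM
  have hkne : k ≠ "" := by
    rcases List.mem_map.mp ((PySem.Set.mem_ofList _ _).mp hk) with ⟨x, hx, rfl⟩
    simpa using List.of_mem_filter hx
  congr 1
  -- counts entry for k = number of distinct (k, path) pairs
  set s := PySem.List.sorted2 rows Prod.fst Prod.snd with hs
  have hsp : s.Perm rows := PySem.List.sorted2_perm rows Prod.fst Prod.snd false
  rw [pv_foldC, PySem.Dict.getD_empty,
      pv_runs_sorted s none k (pv_sorted2_pairwise rows) (fun p hp => by cases hp)]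
  have hpred : ∀ x : String × String,
      (decide ((some x ≠ (none : Option (String × String)) ∧ x.1 ≠ "") ∧ x.1 = k)) =
        ((x.1 == k) && decide (x.1 ≠ "")) := by
    intro x
    by_cases h1 : x.1 = k <;> by_cases h2 : x.1 = "" <;> simp [h1, h2]
  have hfs : s.filter (fun x => decide ((some x ≠ none ∧ x.1 ≠ "") ∧ x.1 = k)) =
      s.filter (fun x => (x.1 == k) && decide (x.1 ≠ "")) :=
    List.filter_congr (fun x _ => hpred x)
  have hMk : M.filter (fun x => x.1 == k) =
      rows.filter (fun x => (x.1 == k) && decide (x.1 ≠ "")) := by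
    rw [hM, List.filter_filter]
  have hperm : (s.filter (fun x => (x.1 == k) && decide (x.1 ≠ ""))).Perm
      (M.filter (fun x => x.1 == k)) := by
    rw [hMk]; exact hsp.filter _
  have hinj : ∀ x ∈ M.filter (fun x => x.1 == k), ∀ y ∈ M.filter (fun x => x.1 == k),
      Prod.snd x = Prod.snd y → x = y := by
    intro x hx y hy hxy
    have hx1 : x.1 = k := by simpa using (List.of_mem_filter hx)
    have hy1 : y.1 = k := by simpa using (List.of_mem_filter hy)
    exact Prod.ext (hx1.trans hy1.symm) hxy
  rw [hfs, pv_length_ofList_perm hperm, pv_ofList_map_inj _ _ hinj]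
  simp [PySem.Set.len]
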